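-- pv_equiv track=rewrite | github.com/Jo-9m-n1/Python_Dawson | Sliding_puzzle (2).py | findEmptyTile
-- ===== SOURCE A (Python) =====
-- def findEmptyTile(puzzle):
--     row = 0
--     col = 0
--     for i in range(len(puzzle)):
--         for j in range(len(puzzle[0])):
--             if puzzle[i][j] == '  ':
--                 row = i
--                 col = j
--     return (row, col)
-- ===== SOURCE B (Python) =====
-- def findEmptyTile(puzzle):
--     if not puzzle:
--         return (0, 0)
--     w = len(puzzle[0])
--     for i in range(len(puzzle) - 1, -1, -1):
--         row = puzzle[i]
--         for j in range(w - 1, -1, -1):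
--             if row[j] == '  ':
--                 return (i, j)
--     return (0, 0)
-- ===== Notes on version B (the rewrite author's own statement) =====
-- stated objective: alternative
-- what changed: B scans the grid in reverse row-major order and returns the first match (the last occurrence) immediately, instead of A's full forward scan that overwrites (row,col) on every match.
import Mathlib
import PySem

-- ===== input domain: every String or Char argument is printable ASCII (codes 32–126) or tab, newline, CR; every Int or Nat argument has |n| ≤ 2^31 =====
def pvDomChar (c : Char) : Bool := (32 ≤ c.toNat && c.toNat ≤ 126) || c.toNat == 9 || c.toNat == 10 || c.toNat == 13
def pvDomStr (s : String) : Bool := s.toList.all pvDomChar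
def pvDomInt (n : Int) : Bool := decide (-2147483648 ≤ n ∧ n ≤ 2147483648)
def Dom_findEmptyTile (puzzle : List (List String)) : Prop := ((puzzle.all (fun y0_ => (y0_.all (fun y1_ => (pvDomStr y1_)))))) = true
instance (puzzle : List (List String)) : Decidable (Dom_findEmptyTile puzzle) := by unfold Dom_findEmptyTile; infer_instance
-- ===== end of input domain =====

-- B scans the grid in reverse row-major order and returns the first (= last-occurrence) match
-- immediately, instead of A's full forward scan that overwrites (row, col) on every match.

-- ===== PORT A =====
-- literal port of A: two nested forward loops over range(len(puzzle)) × range(len(puzzle[0])),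
-- overwriting the (row, col) accumulator on every cell equal to '  '
def findEmptyTile (puzzle : List (List String)) : Int × Int :=
  (PySem.List.pyRange 0 (puzzle.length : Int) 1).foldl
    (fun rc i =>
      (PySem.List.pyRange 0 (((PySem.List.pyGet? puzzle 0).getD []).length : Int) 1).foldl
        (fun rc j =>
          if ((PySem.List.pyGet? ((PySem.List.pyGet? puzzle i).getD []) j).getD "") = "  " then (i, j)
          else rc)
        rc)
    ((0 : Int), (0 : Int))

-- ===== PORT B =====
-- inner reversed loop of B: scan row at indices w-1 … 0, first match wins
def findRowRev (row : List String) : Nat → Option Nat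
  | 0 => none
  | j + 1 =>
    if ((PySem.List.pyGet? row (j : Int)).getD "") = "  " then some j else findRowRev row j

-- outer reversed loop of B: rows i-1 … 0, return on first row containing a match
def findRev (puzzle : List (List String)) (w : Nat) : Nat → Int × Int
  | 0 => ((0 : Int), (0 : Int))
  | i + 1 =>
    match findRowRev ((PySem.List.pyGet? puzzle (i : Int)).getD []) w with
    | some j => ((i : Int), (j : Int))
    | none => findRev puzzle w i

def findEmptyTile_alt (puzzle : List (List String)) : Int × Int :=
  match puzzle with
  | [] => ((0 : Int), (0 : Int))
  | r0 :: _ => findRev puzzle r0.length puzzle.length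

-- ===== PRECONDITION & SPEC =====
-- Pre_ excludes exactly the ragged non-empty grids with some row shorter than the first row:
-- there Python A raises IndexError (and Python B raises too unless it exits first).
def Pre_findEmptyTile (puzzle : List (List String)) : Prop :=
  ∀ r ∈ puzzle, (puzzle.headD []).length ≤ r.length
instance (puzzle : List (List String)) : Decidable (Pre_findEmptyTile puzzle) := by
  unfold Pre_findEmptyTile; infer_instance

def pvWitness_findEmptyTile : List (List String) := [["x", "  "], ["a", "b"]]

def Spec_findEmptyTile (puzzle : List (List String)) (out : Int × Int) : Prop := out = findEmptyTile_alt puzzle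
instance (puzzle : List (List String)) (out : Int × Int) : Decidable (Spec_findEmptyTile puzzle out) := by unfold Spec_findEmptyTile; infer_instance

-- ===== CLAIM (what is proved, stated in full; the proofs are below) =====
def Claim_equal_findEmptyTile : Prop := ∀ (puzzle : List (List String)), Dom_findEmptyTile puzzle → Pre_findEmptyTile puzzle → Spec_findEmptyTile puzzle (findEmptyTile puzzle)

-- ===== LEMMAS AND PROOFS =====

-- A's inner forward fold over a row equals B's reverse scan of the same row:
-- the last overwritten column is the largest matching index below w.
lemma inner_fold_eq (row : List String) (i : Int) :
    ∀ (w : Nat) (rc : Int × Int),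
      (PySem.List.pyRange 0 (w : Int) 1).foldl
        (fun rc j =>
          if ((PySem.List.pyGet? row j).getD "") = "  " then (i, j) else rc) rc
      = match findRowRev row w with
        | some j => (i, (j : Int))
        | none => rc := by
  intro w
  induction w with
  | zero =>
    intro rc
    simp [PySem.List.pyRange_one_eq_nil (le_refl (0 : Int)), findRowRev]
  | succ w ih =>
    intro rc
    have hc : ((w + 1 : Nat) : Int) = (w : Int) + 1 := by push_cast; ring
    rw [hc, PySem.List.pyRange_one_succ_right (by positivity), List.foldl_append]
    simp only [List.foldl_cons, List.foldl_nil, findRowRev, ih]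
    by_cases h : (row[w]?.getD "") = "  " <;>
      cases hfr : findRowRev row w <;> simp_all

-- A's outer forward fold equals B's reverse row scan.
lemma outer_fold_eq (puzzle : List (List String)) :
    ∀ (n : Nat),
      (PySem.List.pyRange 0 (n : Int) 1).foldl
        (fun rc i =>
          (PySem.List.pyRange 0 (((PySem.List.pyGet? puzzle 0).getD []).length : Int) 1).foldl
            (fun rc j =>
              if ((PySem.List.pyGet? ((PySem.List.pyGet? puzzle i).getD []) j).getD "") = "  " then (i, j)
              else rc)
            rc)
        ((0 : Int), (0 : Int))
      = findRev puzzle ((PySem.List.pyGet? puzzle 0).getD []).length n := by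
  intro n
  induction n with
  | zero =>
    simp [PySem.List.pyRange_one_eq_nil (le_refl (0 : Int)), findRev]
  | succ n ih =>
    have hc : ((n + 1 : Nat) : Int) = (n : Int) + 1 := by push_cast; ring
    rw [hc, PySem.List.pyRange_one_succ_right (by positivity), List.foldl_append]
    simp only [List.foldl_cons, List.foldl_nil, ih,
      inner_fold_eq ((PySem.List.pyGet? puzzle (n : Int)).getD []) (n : Int)]
    cases hfr : findRowRev ((PySem.List.pyGet? puzzle (n : Int)).getD [])
        ((PySem.List.pyGet? puzzle 0).getD []).length <;>
      simp_all [findRev]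

-- ===== VERDICT (by name: the statement is the Claim_ definition above) =====
theorem findEmptyTile_spec : Claim_equal_findEmptyTile := by
  intro puzzle _ _
  unfold Spec_findEmptyTile findEmptyTile findEmptyTile_alt
  rw [outer_fold_eq]
  cases puzzle with
  | nil => simp [findRev]
  | cons r0 rest => simp [PySem.List.pyGet?, PySem.List.pyIdx?]
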